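-- pv_equiv track=rewrite | github.com/frybook/Moon-s_Project | 작업 및 프로젝트/Music_chord/Trans_Key.py | replace_consecutive_duplicates
-- ===== SOURCE A (Python) =====
-- def replace_consecutive_duplicates(chords):
--     if not chords:
--         return []
--
--     result = [chords[0]]  # Initialize with the first chord
--     for chord in chords[1:]:
--         if chord == result[-1]:
--             result.append('')
--         else:
--             result.append(chord)
--     return result
-- ===== SOURCE B (Python) =====
-- def replace_consecutive_duplicates(chords):
--     result = []
--     i = 0
--     while i < len(chords):
--         j = i
--         while j < len(chords) and chords[j] == chords[i]:
--             j += 1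
--         result.extend(chords[i] if k % 2 == 0 else '' for k in range(j - i))
--         i = j
--     return result
-- ===== Notes on version B (the rewrite author's own statement) =====
-- stated objective: alternative
-- what changed: B decomposes the input into maximal runs of equal chords and renders each run directly (the chord at even run positions, '' at odd ones), instead of A's single accumulator loop that compares each chord against the last emitted value result[-1].
import Mathlib
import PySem

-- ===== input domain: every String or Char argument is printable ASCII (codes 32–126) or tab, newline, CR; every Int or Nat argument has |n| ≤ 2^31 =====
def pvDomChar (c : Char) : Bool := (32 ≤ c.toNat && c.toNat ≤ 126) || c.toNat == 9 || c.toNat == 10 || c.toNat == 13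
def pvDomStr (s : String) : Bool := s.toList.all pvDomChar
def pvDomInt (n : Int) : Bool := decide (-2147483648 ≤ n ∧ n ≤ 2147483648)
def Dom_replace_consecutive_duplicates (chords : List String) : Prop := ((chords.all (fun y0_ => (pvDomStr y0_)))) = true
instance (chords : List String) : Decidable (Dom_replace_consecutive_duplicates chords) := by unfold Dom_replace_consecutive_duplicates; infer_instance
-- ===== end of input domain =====

-- B rebuilds the output run by run: each maximal run of equal chords is rendered with the
-- chord at even run positions and '' at odd ones, instead of A's single loop that appends to
-- a result list and compares each chord against the last emitted value result[-1]
-- (objective: alternative decomposition; same O(n) cost).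

-- ===== PORT A =====
-- A reads result[-1]; result is initialised non-empty and only grows, so List.getLastD _ ""
-- is exact here (the default branch is unreachable).
def replace_consecutive_duplicates (chords : List String) : List String :=
  match chords with
  | [] => []
  | c0 :: rest =>
    rest.foldl (fun result chord =>
      if chord = result.getLastD "" then result ++ [""] else result ++ [chord]) [c0]

-- ===== PORT B =====
-- Source B's outer while loop over run starts: the inner scan to the end of the current run is
-- takeWhile/dropWhile, 'extend' of the alternating run is the List.range map, and advancing
-- i to j is the recursive call on the remainder after the run.
def replace_consecutive_duplicates_alt (chords : List String) : List String :=
  match chords with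
  | [] => []
  | c :: rest =>
    (List.range (1 + (rest.takeWhile (fun x => x = c)).length)).map
        (fun k => if k % 2 = 0 then c else "") ++
      replace_consecutive_duplicates_alt (rest.dropWhile (fun x => x = c))
termination_by chords.length
decreasing_by
  have := List.length_dropWhile_le (fun x => x = c) rest
  simp only [List.length_cons]
  omega

-- ===== PRECONDITION & SPEC =====
def Spec_replace_consecutive_duplicates (chords : List String) (out : List String) : Prop := out = replace_consecutive_duplicates_alt chords
instance (chords : List String) (out : List String) : Decidable (Spec_replace_consecutive_duplicates chords out) := by unfold Spec_replace_consecutive_duplicates; infer_instance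

-- ===== CLAIM (what is proved, stated in full; the proofs are below) =====
def Claim_equal_replace_consecutive_duplicates : Prop := ∀ (chords : List String), Dom_replace_consecutive_duplicates chords → Spec_replace_consecutive_duplicates chords (replace_consecutive_duplicates chords)

-- ===== LEMMAS AND PROOFS =====

-- proof-only intermediate: the same output computed chord by chord, tracking the previous
-- ORIGINAL chord and the position inside the current run
def rcdGo (prev : Option String) (run : Nat) (chords : List String) : List String :=
  match chords with
  | [] => []
  | c :: rest =>
    if some c = prev then
      (if (run + 1) % 2 = 0 then c else "") :: rcdGo prev (run + 1) rest
    else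
      c :: rcdGo (some c) 0 rest

-- A's accumulator always ends in the value rcdGo would have just emitted for state (prev, run)
theorem rcd_invariant (rest : List String) :
    ∀ (acc : List String) (prev : String) (run : Nat),
      acc.getLastD "" = (if run % 2 = 0 then prev else "") →
      rest.foldl (fun result chord =>
        if chord = result.getLastD "" then result ++ [""] else result ++ [chord]) acc
        = acc ++ rcdGo (some prev) run rest := by
  induction rest with
  | nil => intro acc prev run _; simp [rcdGo]
  | cons c rest ih =>
    intro acc prev run hlast
    simp only [List.foldl_cons]
    by_cases hcp : c = prev
    · subst hcp
      have hB : rcdGo (some c) run (c :: rest)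
          = (if (run + 1) % 2 = 0 then c else "") :: rcdGo (some c) (run + 1) rest := by
        simp [rcdGo]
      rw [hB]
      by_cases hpar : run % 2 = 0
      · -- last emitted is c itself; A appends "", rcdGo emits "" (run+1 odd)
        have h1 : ¬ (run + 1) % 2 = 0 := by omega
        rw [if_pos (by rw [hlast, if_pos hpar]), if_neg h1,
          ih (acc ++ [""]) c (run + 1) (by rw [if_neg h1]; simp)]
        simp
      · -- last emitted is ""; A appends c iff c = "", rcdGo emits c (run+1 even)
        have h1 : (run + 1) % 2 = 0 := by omega
        rw [if_pos h1]
        by_cases hce : c = ""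
        · rw [if_pos (by rw [hlast, if_neg hpar]; exact hce),
            ih (acc ++ [""]) c (run + 1) (by rw [if_pos h1]; simp [hce])]
          simp [hce]
        · rw [if_neg (by rw [hlast, if_neg hpar]; exact hce),
            ih (acc ++ [c]) c (run + 1) (by rw [if_pos h1]; simp)]
          simp
    · -- run breaks: rcdGo emits c with state (c, 0)
      have hB : rcdGo (some prev) run (c :: rest) = c :: rcdGo (some c) 0 rest := by
        simp [rcdGo, hcp]
      rw [hB]
      by_cases hlastc : c = acc.getLastD ""
      · -- only possible when last emitted is "" (run odd) and c = "": appended "" equals c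
        have hce : c = "" := by
          rw [hlast] at hlastc
          by_cases hpar : run % 2 = 0
          · exact absurd (by rw [if_pos hpar] at hlastc; exact hlastc) hcp
          · rw [if_neg hpar] at hlastc; exact hlastc
        rw [if_pos hlastc, ih (acc ++ [""]) c 0 (by simp [hce])]
        simp [hce]
      · rw [if_neg hlastc, ih (acc ++ [c]) c 0 (by simp)]
        simp

-- mapping over range with an index shifted by one
theorem rcd_shift (f g : Nat → String) (m : Nat) (h : ∀ k, f k = g (k + 1)) :
    (List.range m).map f = (List.range m).map (g ∘ Nat.succ) := by
  refine List.map_congr_left fun k _ => ?_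
  simp only [Function.comp_apply, Nat.succ_eq_add_one]
  exact h k

-- continuing rcdGo inside a run of c equals the alternating rendering of the run's remainder
-- followed by a fresh start on the part after the run
theorem rcdGo_run (rest : List String) :
    ∀ (c : String) (j : Nat),
      rcdGo (some c) j rest =
        (List.range (rest.takeWhile (fun x => x = c)).length).map
            (fun k => if (j + 1 + k) % 2 = 0 then c else "") ++
          rcdGo none 0 (rest.dropWhile (fun x => x = c)) := by
  induction rest with
  | nil => intro c j; simp [rcdGo]
  | cons d rest ih =>
    intro c j
    by_cases hdc : d = c
    · subst hdc
      rw [show rcdGo (some d) j (d :: rest)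
            = (if (j + 1) % 2 = 0 then d else "") :: rcdGo (some d) (j + 1) rest by
          simp [rcdGo]]
      rw [ih d (j + 1)]
      rw [show (d :: rest).takeWhile (fun x => x = d) = d :: rest.takeWhile (fun x => x = d) by
            simp,
          show (d :: rest).dropWhile (fun x => x = d) = rest.dropWhile (fun x => x = d) by
            simp]
      rw [List.length_cons, List.range_succ_eq_map, List.map_cons, List.map_map]
      have hsh : ∀ k : Nat, (if (j + 1 + 1 + k) % 2 = 0 then d else "")
          = (if (j + 1 + (k + 1)) % 2 = 0 then d else "") := by
        intro k
        have h : j + 1 + 1 + k = j + 1 + (k + 1) := by omega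
        rw [h]
      rw [rcd_shift (fun k => if (j + 1 + 1 + k) % 2 = 0 then d else "")
            (fun k => if (j + 1 + k) % 2 = 0 then d else "") _ hsh]
      simp
    · rw [show rcdGo (some c) j (d :: rest) = d :: rcdGo (some d) 0 rest by
          simp [rcdGo, Option.some.injEq, hdc]]
      rw [show (d :: rest).takeWhile (fun x => x = c) = [] by simp [hdc],
          show (d :: rest).dropWhile (fun x => x = c) = d :: rest by
            simp [hdc]]
      simp [rcdGo]

-- B's run-by-run output equals the chord-by-chord intermediate
theorem alt_eq_rcdGo (chords : List String) :
    replace_consecutive_duplicates_alt chords = rcdGo none 0 chords := by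
  fun_induction replace_consecutive_duplicates_alt chords with
  | case1 => simp [rcdGo]
  | case2 c rest ih =>
    rw [show rcdGo none 0 (c :: rest) = c :: rcdGo (some c) 0 rest by simp [rcdGo]]
    rw [ih, rcdGo_run rest c 0, Nat.add_comm 1, List.range_succ_eq_map, List.map_cons,
      List.map_map]
    have hsh : ∀ k : Nat, (if (0 + 1 + k) % 2 = 0 then c else "")
        = (if (k + 1) % 2 = 0 then c else "") := by
      intro k
      have h : 0 + 1 + k = k + 1 := by omega
      rw [h]
    rw [rcd_shift (fun k => if (0 + 1 + k) % 2 = 0 then c else "")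
          (fun k => if k % 2 = 0 then c else "") _ hsh]
    simp

-- ===== VERDICT (by name: the statement is the Claim_ definition above) =====
theorem replace_consecutive_duplicates_spec : Claim_equal_replace_consecutive_duplicates := by
  intro chords _
  unfold Spec_replace_consecutive_duplicates
  rw [alt_eq_rcdGo]
  cases chords with
  | nil => simp [replace_consecutive_duplicates, rcdGo]
  | cons c0 rest =>
    show replace_consecutive_duplicates (c0 :: rest) = _
    simp only [replace_consecutive_duplicates]
    rw [rcd_invariant rest [c0] c0 0 (by simp),
      show rcdGo none 0 (c0 :: rest) = c0 :: rcdGo (some c0) 0 rest by simp [rcdGo]]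
    simp
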